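-- pv_equiv track=rewrite | github.com/yasufumi-nakata/Pytra | src/toolchain/link/linker.py | _type_id_const_name
-- ===== SOURCE A (Python) =====
-- def _type_id_const_name(fqcn: str) -> str:
--     dotted = fqcn.replace(".", "_")
--     chars: list[str] = []
--     prev_is_lower = False
--     for ch in dotted:
--         is_upper = "A" <= ch and ch <= "Z"
--         is_lower = "a" <= ch and ch <= "z"
--         if is_upper and prev_is_lower:
--             chars.append("_")
--         chars.append(ch.upper())
--         prev_is_lower = is_lower
--     result = "".join(chars) + "_TID"
--     # C++ identifiers must not start with a digit (e.g. module "18_foo" → "18_FOO_TID").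
--     if result and "0" <= result[0] and result[0] <= "9":
--         result = "_" + result
--     return result
-- ===== SOURCE B (Python) =====
-- def _type_id_const_name(fqcn: str) -> str:
--     # Staged word-splitting: compute the list of word-start indices (each
--     # lowercase->uppercase boundary), slice the string into words at those
--     # indices, then join with "_" and uppercase the whole string once.
--     s = fqcn.replace(".", "_")
--     starts = [i for i in range(1, len(s)) if "a" <= s[i - 1] <= "z" and "A" <= s[i] <= "Z"]
--     bounds = [0] + starts + [len(s)]
--     words = [s[a:b] for a, b in zip(bounds, bounds[1:])]
--     result = "_".join(words).upper() + "_TID"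
--     if "0" <= result[0] <= "9":
--         result = "_" + result
--     return result
-- ===== Notes on version B (the rewrite author's own statement) =====
-- stated objective: alternative
-- what changed: Replaced A's single stateful character loop (prev_is_lower flag, per-char uppercasing, char-list accumulator) by a staged word-splitting pipeline: compute the list of lowercase-to-uppercase boundary indices, slice the string into words at those indices, join the words with '_' and uppercase the whole string once.
import Mathlib
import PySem

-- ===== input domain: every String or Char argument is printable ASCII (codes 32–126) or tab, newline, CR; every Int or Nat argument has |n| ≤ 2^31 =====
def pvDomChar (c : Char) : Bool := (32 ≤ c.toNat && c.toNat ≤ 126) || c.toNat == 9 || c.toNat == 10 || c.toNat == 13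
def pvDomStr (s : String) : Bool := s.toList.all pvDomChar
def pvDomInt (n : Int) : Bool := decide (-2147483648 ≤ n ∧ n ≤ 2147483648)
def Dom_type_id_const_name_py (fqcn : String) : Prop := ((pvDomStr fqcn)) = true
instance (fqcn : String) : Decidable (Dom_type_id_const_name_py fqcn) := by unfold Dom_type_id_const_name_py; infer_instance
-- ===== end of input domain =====

-- B replaces A's stateful per-character loop by a staged pipeline — boundary-index list, slicing
-- into words, a single join + whole-string uppercase (alternative decomposition, same cost).


-- ===== PORT A =====
-- A's for-loop: carries prev_is_lower, appends "_" then ch.upper() per char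
def typeIdLoopA : Bool → List Char → List Char
  | _, [] => []
  | prev, c :: t =>
      (if ('A' ≤ c ∧ c ≤ 'Z') ∧ prev = true then ['_'] else [])
        ++ PySem.Chars.upperChar c :: typeIdLoopA (decide ('a' ≤ c ∧ c ≤ 'z')) t

def type_id_const_name_py (fqcn : String) : String :=
  let dotted := PySem.Chars.replace fqcn.toList ['.'] ['_']   -- fqcn.replace(".", "_")
  let res := typeIdLoopA false dotted ++ ['_', 'T', 'I', 'D'] -- "".join(chars) + "_TID"
  String.ofList (match res with                               -- leading-digit guard ("result and" = nonempty test)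
    | c :: rest => if '0' ≤ c ∧ c ≤ '9' then '_' :: c :: rest else c :: rest
    | [] => [])

-- ===== PORT B =====
-- the comprehension's filter: "a" <= s[i-1] <= "z" and "A" <= s[i] <= "Z"
def bIsBnd (s : List Char) (i : Int) : Bool :=
  decide ('a' ≤ PySem.List.pyGetD s (i - 1) ' ' ∧ PySem.List.pyGetD s (i - 1) ' ' ≤ 'z')
    && decide ('A' ≤ PySem.List.pyGetD s i ' ' ∧ PySem.List.pyGetD s i ' ' ≤ 'Z')

-- starts = [i for i in range(1, len(s)) if ...]
def bStarts (s : List Char) : List Int :=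
  (PySem.List.pyRange 1 (s.length : Int) 1).filter (bIsBnd s)

-- words = [s[a:b] for a, b in zip(bounds, bounds[1:])]
def bWords (s : List Char) (bounds : List Int) : List (List Char) :=
  (bounds.zip (PySem.List.slice bounds (some 1) none)).map
    (fun ab => PySem.List.slice s (some ab.1) (some ab.2))

def type_id_const_name_py_alt (fqcn : String) : String :=
  let s := PySem.Chars.replace fqcn.toList ['.'] ['_']        -- fqcn.replace(".", "_")
  let bounds : List Int := 0 :: bStarts s ++ [(s.length : Int)]  -- [0] + starts + [len(s)]
  let res := PySem.Chars.upper (PySem.Chars.join ['_'] (bWords s bounds)) ++ ['_', 'T', 'I', 'D']  -- "_".join(words).upper() + "_TID"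
  String.ofList (match res with                               -- leading-digit guard (result is never empty)
    | c :: rest => if '0' ≤ c ∧ c ≤ '9' then '_' :: c :: rest else c :: rest
    | [] => [])

-- ===== PRECONDITION & SPEC =====
def Spec_type_id_const_name_py (fqcn : String) (out : String) : Prop := out = type_id_const_name_py_alt fqcn
instance (fqcn : String) (out : String) : Decidable (Spec_type_id_const_name_py fqcn out) := by unfold Spec_type_id_const_name_py; infer_instance

-- ===== CLAIM (what is proved, stated in full; the proofs are below) =====
def Claim_equal_type_id_const_name_py : Prop := ∀ (fqcn : String), Dom_type_id_const_name_py fqcn → Spec_type_id_const_name_py fqcn (type_id_const_name_py fqcn)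

-- ===== LEMMAS AND PROOFS =====

def insB : Bool → List Char → List Char
  | _, [] => []
  | prev, c :: t =>
      (if ('A' ≤ c ∧ c ≤ 'Z') ∧ prev = true then ['_'] else [])
        ++ c :: insB (decide ('a' ≤ c ∧ c ≤ 'z')) t

def prevFlag (p : Bool) (s : List Char) : Bool :=
  match s.getLast? with
  | some x => decide ('a' ≤ x ∧ x ≤ 'z')
  | none => p

def bBody (s : List Char) : List Char :=
  PySem.Chars.join ['_'] (bWords s (0 :: bStarts s ++ [(s.length : Int)]))

theorem prevFlag_cons (p : Bool) (a : Char) (t : List Char) :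
    prevFlag p (a :: t) = prevFlag (decide ('a' ≤ a ∧ a ≤ 'z')) t := by
  cases t with
  | nil => simp [prevFlag]
  | cons b u =>
      simp only [prevFlag]
      cases h : (b :: u).getLast? with
      | none => simp at h
      | some x => rw [List.getLast?_cons_cons, h]

theorem insB_snoc (p : Bool) (s : List Char) (c : Char) :
    insB p (s ++ [c]) =
      insB p s ++ (if ('A' ≤ c ∧ c ≤ 'Z') ∧ prevFlag p s = true then ['_'] else []) ++ [c] := by
  induction s generalizing p with
  | nil => simp [insB, prevFlag]
  | cons a t ih =>
      simp only [List.cons_append, insB, ih, prevFlag_cons]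
      simp [List.append_assoc]

theorem join_concat (sep w a : List Char) (t : List (List Char)) :
    PySem.Chars.join sep ((a :: t) ++ [w]) = PySem.Chars.join sep (a :: t) ++ sep ++ w := by
  induction t generalizing a with
  | nil => simp [PySem.Chars.join_cons_cons, PySem.Chars.join_singleton]
  | cons b t' ih =>
      simp only [List.cons_append, PySem.Chars.join_cons_cons]
      rw [← List.cons_append, ih b]
      simp [List.append_assoc]

theorem zipTail_snoc (l : List Int) (a x : Int) :
    ((a :: l) ++ [x]).zip (l ++ [x]) =
      (a :: l).zip l ++ [((a :: l).getLast (by simp), x)] := by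
  induction l generalizing a with
  | nil => simp
  | cons b t ih =>
      simp only [List.cons_append, List.zip_cons_cons, List.getLast_cons_cons]
      exact congrArg _ (ih b)

theorem pyGetD_append_lt (s : List Char) (x : Char) (j : Int) (d : Char)
    (h0 : 0 ≤ j) (h1 : j < (s.length : Int)) :
    PySem.List.pyGetD (s ++ [x]) j d = PySem.List.pyGetD s j d := by
  rw [PySem.List.pyGetD_eq_getElem (s ++ [x]) d h0 (by simp; omega),
      PySem.List.pyGetD_eq_getElem s d h0 h1,
      List.getElem_append_left (by omega)]

theorem pyGetD_append_last (s : List Char) (x : Char) (d : Char) :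
    PySem.List.pyGetD (s ++ [x]) (s.length : Int) d = x := by
  rw [PySem.List.pyGetD_eq_getElem (s ++ [x]) d (by omega) (by simp)]
  simp

theorem bIsBnd_last (s : List Char) (c : Char) (hs : s ≠ []) :
    bIsBnd (s ++ [c]) (s.length : Int) =
      (prevFlag false s && decide ('A' ≤ c ∧ c ≤ 'Z')) := by
  unfold bIsBnd
  have h1 : 1 ≤ s.length := List.length_pos_of_ne_nil hs
  rw [show (s.length : Int) - 1 = ((s.length - 1 : Nat) : Int) by omega]
  rw [pyGetD_append_lt _ _ _ _ (by omega) (by omega), pyGetD_append_last,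
      PySem.List.pyGetD_eq_getElem s ' ' (by omega) (by omega)]
  rw [prevFlag, List.getLast?_eq_some_getLast hs]
  rw [List.getLast_eq_getElem]
  simp [Bool.and_comm]

theorem slice_append_left (s : List Char) (x : Char) (a b : Int)
    (h0 : 0 ≤ a) (h0' : 0 ≤ b) (ha : a ≤ (s.length : Int)) (hb : b ≤ (s.length : Int)) :
    PySem.List.slice (s ++ [x]) (some a) (some b) = PySem.List.slice s (some a) (some b) := by
  rw [PySem.List.slice_toNat (s ++ [x]) h0 h0', PySem.List.slice_toNat s h0 h0',
      List.drop_append_of_le_length (by omega),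
      List.take_append_of_le_length (by simp; omega)]

theorem slice_append_end (s : List Char) (x : Char) (a : Int)
    (h0 : 0 ≤ a) (ha : a ≤ (s.length : Int)) :
    PySem.List.slice (s ++ [x]) (some a) (some ((s.length : Int) + 1)) =
      PySem.List.slice s (some a) (some (s.length : Int)) ++ [x] := by
  rw [PySem.List.slice_toNat (s ++ [x]) h0 (by omega), PySem.List.slice_toNat s h0 (by omega),
      List.drop_append_of_le_length (by omega),
      List.take_of_length_le (by simp; omega)]
  rw [List.take_of_length_le (by simp)]

theorem join_concat_ne (sep w : List Char) (ws : List (List Char)) (h : ws ≠ []) :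
    PySem.Chars.join sep (ws ++ [w]) = PySem.Chars.join sep ws ++ sep ++ w := by
  cases ws with
  | nil => exact absurd rfl h
  | cons a t => exact join_concat sep w a t

theorem join_concat_snocc (sep : List Char) (c : Char) (w : List Char) (ws : List (List Char)) :
    PySem.Chars.join sep (ws ++ [w ++ [c]]) = PySem.Chars.join sep (ws ++ [w]) ++ [c] := by
  cases ws with
  | nil => simp [PySem.Chars.join_singleton]
  | cons a t => rw [join_concat, join_concat]; simp [List.append_assoc]

theorem bStarts_bounds (s : List Char) : ∀ i ∈ bStarts s, 1 ≤ i ∧ i < (s.length : Int) := by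
  intro i hi
  exact PySem.List.mem_pyRange_one.mp (List.mem_filter.mp hi).1

theorem bStarts_append (s : List Char) (c : Char) (hs : s ≠ []) :
    bStarts (s ++ [c]) =
      bStarts s ++ (if bIsBnd (s ++ [c]) (s.length : Int) = true then [(s.length : Int)] else []) := by
  unfold bStarts
  have h1 : 0 < s.length := List.length_pos_of_ne_nil hs
  rw [show ((s ++ [c]).length : Int) = (s.length : Int) + 1 by simp]
  rw [PySem.List.pyRange_one_succ_right (by omega), List.filter_append]
  congr 1
  · apply List.filter_congr
    intro i hi
    have h := PySem.List.mem_pyRange_one.mp hi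
    unfold bIsBnd
    rw [pyGetD_append_lt _ _ _ _ (by omega) (by omega),
        pyGetD_append_lt _ _ _ _ (by omega) (by omega)]
  · rw [List.filter_singleton]
    split <;> simp_all

theorem map_slice_stable (s : List Char) (c : Char) :
    ((0 :: bStarts s).zip (bStarts s)).map
        (fun ab => PySem.List.slice (s ++ [c]) (some ab.1) (some ab.2)) =
      ((0 :: bStarts s).zip (bStarts s)).map
        (fun ab => PySem.List.slice s (some ab.1) (some ab.2)) := by
  apply List.map_congr_left
  intro p hp
  obtain ⟨hp1, hp2⟩ := List.of_mem_zip hp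
  have b2 := bStarts_bounds s p.2 hp2
  have b1 : 0 ≤ p.1 ∧ p.1 ≤ (s.length : Int) := by
    rcases List.mem_cons.mp hp1 with h | h
    · rw [h]; omega
    · have := bStarts_bounds s p.1 h; omega
  exact slice_append_left s c p.1 p.2 b1.1 (by omega) b1.2 (by omega)

theorem getLast_bounds (s : List Char) :
    0 ≤ (0 :: bStarts s).getLast (by simp) ∧
      (0 :: bStarts s).getLast (by simp) ≤ (s.length : Int) := by
  have h := List.getLast_mem (l := 0 :: bStarts s) (by simp)
  rcases List.mem_cons.mp h with h | h
  · rw [h]; omega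
  · have := bStarts_bounds s _ h; omega

theorem slice_nn (s : List Char) : PySem.List.slice s (some (s.length : Int)) (some (s.length : Int)) = [] := by
  rw [PySem.List.slice_toNat s (by omega) (by omega)]
  simp

theorem zipTail_snoc' (l : List Int) (a x : Int) :
    (a :: (l ++ [x])).zip (l ++ [x]) =
      (a :: l).zip l ++ [((a :: l).getLast (by simp), x)] := zipTail_snoc l a x

theorem getLast_cons_append (a : Int) (l : List Int) (x : Int) :
    (a :: (l ++ [x])).getLast (by simp) = x := by
  induction l generalizing a with
  | nil => rfl
  | cons b t ih => rw [List.getLast_cons (by simp)]; exact ih b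

theorem bBody_snoc (s : List Char) (c : Char) :
    bBody (s ++ [c]) =
      bBody s ++ (if ('A' ≤ c ∧ c ≤ 'Z') ∧ prevFlag false s = true then ['_'] else []) ++ [c] := by
  by_cases hs : s = []
  · subst hs
    simp only [List.nil_append, bBody, bWords, bStarts, prevFlag]
    norm_num [PySem.List.pyRange_one_eq_nil, PySem.List.slice_from_one,
      PySem.Chars.join_singleton, PySem.List.slice_toNat, PySem.Chars.join_nil]
  · have h1 : 0 < s.length := List.length_pos_of_ne_nil hs
    unfold bBody bWords
    rw [PySem.List.slice_from_one, PySem.List.slice_from_one,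
        bStarts_append s c hs, bIsBnd_last s c hs,
        show ((s ++ [c]).length : Int) = (s.length : Int) + 1 by simp]
    rw [show (0 :: bStarts s ++ [(s.length : Int)]).tail = bStarts s ++ [(s.length : Int)] from rfl]
    rw [zipTail_snoc (bStarts s) 0 (s.length : Int), List.map_append]
    by_cases hb : (prevFlag false s && decide ('A' ≤ c ∧ c ≤ 'Z')) = true
    · rw [if_pos hb, if_pos (by rw [Bool.and_eq_true] at hb; exact ⟨by simpa using hb.2, hb.1⟩)]
      rw [show (0 :: (bStarts s ++ [(s.length : Int)]) ++ [(s.length : Int) + 1]).tail =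
            (bStarts s ++ [(s.length : Int)]) ++ [(s.length : Int) + 1] from rfl]
      rw [zipTail_snoc (bStarts s ++ [(s.length : Int)]) 0 ((s.length : Int) + 1)]
      rw [zipTail_snoc' (bStarts s) 0 (s.length : Int)]
      rw [getLast_cons_append]
      rw [List.map_append, List.map_append, map_slice_stable]
      have hgl := getLast_bounds s
      rw [List.map_singleton, List.map_singleton, List.map_singleton]
      rw [slice_append_left s c _ _ hgl.1 (by omega) hgl.2 (by omega)]
      rw [slice_append_end s c (s.length : Int) (by omega) (by omega), slice_nn]
      rw [List.nil_append, join_concat_ne _ _ _ (by simp)]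
    · rw [if_neg hb, if_neg (fun h => hb (by rw [Bool.and_eq_true]; exact ⟨h.2, by simpa using h.1⟩))]
      rw [List.append_nil, List.append_nil]
      rw [show (0 :: bStarts s ++ [(s.length : Int) + 1]).tail = bStarts s ++ [(s.length : Int) + 1] from rfl]
      rw [zipTail_snoc (bStarts s) 0 ((s.length : Int) + 1)]
      rw [List.map_append, map_slice_stable]
      have hgl := getLast_bounds s
      rw [List.map_singleton, List.map_singleton]
      rw [slice_append_end s c _ hgl.1 hgl.2]
      exact join_concat_snocc _ _ _ _

theorem upper_insB (p : Bool) (s : List Char) :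
    PySem.Chars.upper (insB p s) = typeIdLoopA p s := by
  induction s generalizing p with
  | nil => rfl
  | cons c t ih =>
      simp only [insB, typeIdLoopA, PySem.Chars.upper, List.map_append, List.map_cons] at ih ⊢
      rw [ih]
      split <;> rfl

theorem bBody_eq_insB (s : List Char) : bBody s = insB false s := by
  induction s using List.reverseRecOn with
  | nil => rfl
  | append_singleton t c ih => rw [bBody_snoc, insB_snoc, ih]

-- ===== VERDICT (by name: the statement is the Claim_ definition above) =====
theorem type_id_const_name_py_spec : Claim_equal_type_id_const_name_py := by
  intro fqcn _
  show _ = _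
  simp only [type_id_const_name_py, type_id_const_name_py_alt]
  have h := bBody_eq_insB (PySem.Chars.replace fqcn.toList ['.'] ['_'])
  simp only [bBody] at h
  rw [h, ← upper_insB false]
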